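-- pv_equiv track=rewrite | github.com/microsoft/verus-proof-synthesis | verusage/utils.py | get_invariant_lines
-- ===== SOURCE A (Python) =====
-- def get_invariant_lines(code: str) -> list[int]:
--     """
--     return the total number of invariant lines in a code
--     TODO: can be improved by a parser-based impl
--     """
--     lines = []
--
--     invariants = False
--
--     for index, line in enumerate(code.split("\n")):
--         if invariants:
--             if line.strip().startswith("{"):
--                 invariants = False
--             else:
--                 lines.append(index)
--         else:
--             if line.strip().startswith("invariant"):
--                 invariants = True
--
--     return lines
-- ===== SOURCE B (Python) =====
-- def get_invariant_lines(code: str) -> list[int]: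
--     stripped = [line.strip() for line in code.split("\n")]
--     n = len(stripped)
--     braces = [i for i, line in enumerate(stripped) if line.startswith("{")]
--     covered = set()
--     for j, line in enumerate(stripped):
--         if line.startswith("invariant"):
--             end = next((b for b in braces if b > j), n)
--             covered.update(range(j + 1, end))
--     return sorted(covered)
-- ===== Notes on version B (the rewrite author's own statement) =====
-- stated objective: alternative
-- what changed: Replaces A's single-pass boolean flag state machine by an interval construction: B first lists the indices of '{'-starting lines, then for each 'invariant'-starting line unions range(j+1, next brace index or n) into a set, and returns the sorted set.
import Mathlib
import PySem

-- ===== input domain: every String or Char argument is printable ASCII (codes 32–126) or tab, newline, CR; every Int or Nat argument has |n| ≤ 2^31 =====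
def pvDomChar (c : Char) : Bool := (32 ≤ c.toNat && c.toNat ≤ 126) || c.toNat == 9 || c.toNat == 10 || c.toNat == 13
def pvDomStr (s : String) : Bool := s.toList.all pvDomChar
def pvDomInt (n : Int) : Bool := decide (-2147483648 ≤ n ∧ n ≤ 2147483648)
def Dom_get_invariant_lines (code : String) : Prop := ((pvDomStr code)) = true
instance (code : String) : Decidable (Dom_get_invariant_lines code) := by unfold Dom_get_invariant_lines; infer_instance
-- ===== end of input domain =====

-- B replaces A's one-pass flag state machine by an interval construction: it collects the brace
-- line indices once, then unions the ranges (invariant line, next brace line) into a set and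
-- sorts it (alternative decomposition, same result); return value only, no mutation.

-- ===== PORT A =====
-- line.strip().startswith(pre)
def pvStarts (line : List Char) (pre : String) : Bool :=
  PySem.Chars.startswith (PySem.Chars.strip line) pre.toList

-- A's loop body as a fold step over enumerate(code.split("\n"))
def pvStepA : Bool × List Int → Int × List Char → Bool × List Int
  | (invariants, ls), (index, line) =>
    if invariants then
      if pvStarts line "{" then (false, ls)
      else (true, ls ++ [index])
    else
      if pvStarts line "invariant" then (true, ls)
      else (false, ls)

def get_invariant_lines (code : String) : List Int :=
  (List.foldl pvStepA (false, [])
    (PySem.List.enumerate (PySem.Chars.splitOn code.toList "\n".toList) 0)).2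

-- ===== PORT B =====
-- stripped = [line.strip() for line in code.split("\n")]
def pvLinesB (code : String) : List (List Char) :=
  (PySem.Chars.splitOn code.toList "\n".toList).map PySem.Chars.strip

-- braces = [i for i, line in enumerate(stripped) if line.startswith("{")]
def pvBraces (stripped : List (List Char)) : List Int :=
  (PySem.List.enumerate stripped 0).filterMap
    (fun p => if PySem.Chars.startswith p.2 "{".toList then some p.1 else none)

-- next((b for b in braces if b > j), n)
def pvEnd (braces : List Int) (n j : Int) : Int :=
  (braces.find? (fun b => decide (j < b))).getD n

-- the loop filling the set 'covered' with range(j + 1, end) per invariant line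
def pvCover (stripped : List (List Char)) : PySem.Set Int :=
  (PySem.List.enumerate stripped 0).foldl
    (fun s p =>
      if PySem.Chars.startswith p.2 "invariant".toList then
        PySem.Set.update s
          (PySem.List.pyRange (p.1 + 1)
            (pvEnd (pvBraces stripped) (PySem.List.len stripped) p.1) 1)
      else s)
    PySem.Set.empty

-- return sorted(covered)
def get_invariant_lines_alt (code : String) : List Int :=
  PySem.List.sorted (pvCover (pvLinesB code)) (fun x => x) false

-- ===== PRECONDITION & SPEC =====
def Spec_get_invariant_lines (code : String) (out : List Int) : Prop := out = get_invariant_lines_alt code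
instance (code : String) (out : List Int) : Decidable (Spec_get_invariant_lines code out) := by unfold Spec_get_invariant_lines; infer_instance

-- ===== CLAIM (what is proved, stated in full; the proofs are below) =====
def Claim_equal_get_invariant_lines : Prop := ∀ (code : String), Dom_get_invariant_lines code → Spec_get_invariant_lines code (get_invariant_lines code)

-- ===== LEMMAS AND PROOFS =====

-- total "stripped line k starts with …" predicates of the UNstripped line list
def brcAt (ls : List (List Char)) (k : Nat) : Bool := pvStarts (ls.getD k []) "{"
def invAt (ls : List (List Char)) (k : Nat) : Bool := pvStarts (ls.getD k []) "invariant"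

-- "no brace-starting line k with a ≤ k < b"
def noBrc (ls : List (List Char)) (a b : Nat) : Prop :=
  ∀ k, a ≤ k → k < b → brcAt ls k = false

-- the state machine A runs, written as a pair of recursions (proof bridge between the ports)
mutual
def pvOutA (lines : List (List Char)) (i : Nat) : List Int :=
  if h : i < lines.length then
    if pvStarts lines[i] "invariant" then pvInA lines (i + 1)
    else pvOutA lines (i + 1)
  else []
termination_by (lines.length - i, 0)

def pvInA (lines : List (List Char)) (i : Nat) : List Int :=
  if h : i < lines.length then
    if pvStarts lines[i] "{" then pvOutA lines (i + 1)
    else (i : Int) :: pvInA lines (i + 1)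
  else []
termination_by (lines.length - i, 1)
end

-- a line whose stripped form starts with "{" does not start with "invariant"
lemma brace_not_inv (l : List Char) (h : pvStarts l "{" = true) :
    pvStarts l "invariant" = false := by
  unfold pvStarts at *
  rw [PySem.Chars.startswith_iff] at h
  obtain ⟨t, ht⟩ := h
  rw [Bool.eq_false_iff]
  intro hc
  rw [PySem.Chars.startswith_iff] at hc
  obtain ⟨u, hu⟩ := hc
  rw [← ht] at hu
  simp at hu

-- one-step unfolding lemmas for the machine
lemma outA_nil (lines : List (List Char)) (i : Nat) (h : ¬ i < lines.length) :
    pvOutA lines i = [] := by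
  rw [pvOutA.eq_def, dif_neg h]

lemma inA_nil (lines : List (List Char)) (i : Nat) (h : ¬ i < lines.length) :
    pvInA lines i = [] := by
  rw [pvInA.eq_def, dif_neg h]

lemma outA_inv (lines : List (List Char)) (i : Nat) (h : i < lines.length)
    (hs : pvStarts lines[i] "invariant" = true) :
    pvOutA lines i = pvInA lines (i + 1) := by
  rw [pvOutA.eq_def, dif_pos h, if_pos hs]

lemma outA_skip (lines : List (List Char)) (i : Nat) (h : i < lines.length)
    (hs : ¬ pvStarts lines[i] "invariant" = true) :
    pvOutA lines i = pvOutA lines (i + 1) := by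
  rw [pvOutA.eq_def, dif_pos h, if_neg hs]

lemma inA_brace (lines : List (List Char)) (i : Nat) (h : i < lines.length)
    (hb : pvStarts lines[i] "{" = true) :
    pvInA lines i = pvOutA lines (i + 1) := by
  rw [pvInA.eq_def, dif_pos h, if_pos hb]

lemma inA_take (lines : List (List Char)) (i : Nat) (h : i < lines.length)
    (hb : ¬ pvStarts lines[i] "{" = true) :
    pvInA lines i = (i : Int) :: pvInA lines (i + 1) := by
  rw [pvInA.eq_def, dif_pos h, if_neg hb]

-- one-step evaluation of A's fold body
lemma stepA_false (acc : List Int) (idx : Int) (l : List Char) :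
    pvStepA (false, acc) (idx, l) =
      if pvStarts l "invariant" then (true, acc) else (false, acc) := by
  rfl

lemma stepA_true (acc : List Int) (idx : Int) (l : List Char) :
    pvStepA (true, acc) (idx, l) =
      if pvStarts l "{" then (false, acc) else (true, acc ++ [idx]) := by
  rfl

-- A's fold equals the machine, proved with an accumulator invariant
lemma pvLoops (lines : List (List Char)) :
    ∀ (k i : Nat), lines.length - i ≤ k →
      (∀ acc : List Int,
        (List.foldl pvStepA (false, acc) (PySem.List.enumerate (lines.drop i) (i : Int))).2
          = acc ++ pvOutA lines i) ∧
      (∀ acc : List Int,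
        (List.foldl pvStepA (true, acc) (PySem.List.enumerate (lines.drop i) (i : Int))).2
          = acc ++ pvInA lines i) := by
  intro k
  induction k with
  | zero =>
      intro i hi
      have hni : ¬ i < lines.length := by omega
      have hd : lines.drop i = [] := List.drop_eq_nil_of_le (by omega)
      rw [hd]
      constructor <;> intro acc <;>
        simp [PySem.List.enumerate_nil, outA_nil lines i hni, inA_nil lines i hni]
  | succ k ih =>
      intro i hi
      by_cases h : i < lines.length
      · have hd : lines.drop i = lines[i] :: lines.drop (i + 1) :=
          List.drop_eq_getElem_cons h
        have ih' := ih (i + 1) (by omega)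
        have hcast : (i : Int) + 1 = ((i + 1 : Nat) : Int) := by push_cast; ring
        rw [hd]
        constructor <;> intro acc
        · rw [PySem.List.enumerate_cons, List.foldl_cons, stepA_false]
          by_cases hs : pvStarts lines[i] "invariant" = true
          · rw [if_pos hs, hcast, ih'.2 acc, outA_inv lines i h hs]
          · rw [if_neg hs, hcast, ih'.1 acc, outA_skip lines i h hs]
        · rw [PySem.List.enumerate_cons, List.foldl_cons, stepA_true]
          by_cases hb : pvStarts lines[i] "{" = true
          · rw [if_pos hb, hcast, ih'.1 acc, inA_brace lines i h hb]
          · rw [if_neg hb, hcast, ih'.2 (acc ++ [(i : Int)]),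
              inA_take lines i h hb, List.append_assoc]
            rfl
      · have hni := h
        have hd : lines.drop i = [] := List.drop_eq_nil_of_le (by omega)
        rw [hd]
        constructor <;> intro acc <;>
          simp [PySem.List.enumerate_nil, outA_nil lines i hni, inA_nil lines i hni]

lemma brcAt_lt (ls : List (List Char)) (i : Nat) (h : i < ls.length) :
    brcAt ls i = pvStarts ls[i] "{" := by
  unfold brcAt; rw [List.getD_eq_getElem ls [] h]

lemma invAt_lt (ls : List (List Char)) (i : Nat) (h : i < ls.length) :
    invAt ls i = pvStarts ls[i] "invariant" := by
  unfold invAt; rw [List.getD_eq_getElem ls [] h]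

-- what the machine collects: t is collected iff some invariant line j precedes it
-- with no brace-starting line strictly between j and t (and t itself is no brace line)
def OutSpec (ls : List (List Char)) (i t : Nat) : Prop :=
  t < ls.length ∧ brcAt ls t = false ∧
    ∃ j, i ≤ j ∧ j < t ∧ invAt ls j = true ∧ noBrc ls (j + 1) t

def InSpec (ls : List (List Char)) (i t : Nat) : Prop :=
  i ≤ t ∧ t < ls.length ∧ brcAt ls t = false ∧
    (noBrc ls i t ∨ ∃ j, i ≤ j ∧ j < t ∧ invAt ls j = true ∧ noBrc ls (j + 1) t)

lemma memMachine (ls : List (List Char)) :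
    ∀ (k i : Nat), ls.length - i ≤ k →
      (∀ x : Int, x ∈ pvOutA ls i ↔ ∃ t : Nat, x = (t : Int) ∧ OutSpec ls i t) ∧
      (∀ x : Int, x ∈ pvInA ls i ↔ ∃ t : Nat, x = (t : Int) ∧ InSpec ls i t) := by
  intro k
  induction k with
  | zero =>
      intro i hi
      have hni : ¬ i < ls.length := by omega
      constructor <;> intro x <;>
        simp only [outA_nil ls i hni, inA_nil ls i hni, List.not_mem_nil, false_iff] <;>
        rintro ⟨t, -, hspec⟩
      · obtain ⟨ht, -, j, hij, hjt, -⟩ := hspec; omega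
      · obtain ⟨hit, ht, -⟩ := hspec; omega
  | succ k ih =>
      intro i hi
      by_cases h : i < ls.length
      · have ih' := ih (i + 1) (by omega)
        constructor <;> intro x
        · by_cases hs : pvStarts ls[i] "invariant" = true
          · rw [outA_inv ls i h hs, ih'.2 x]
            constructor
            · rintro ⟨t, hx, hit, ht, hbt, hd⟩
              refine ⟨t, hx, ht, hbt, ?_⟩
              rcases hd with hn | ⟨j, hij, hjt, hinv, hn⟩
              · exact ⟨i, le_refl i, by omega, by rw [invAt_lt ls i h]; exact hs, hn⟩
              · exact ⟨j, by omega, hjt, hinv, hn⟩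
            · rintro ⟨t, hx, ht, hbt, j, hij, hjt, hinv, hn⟩
              refine ⟨t, hx, by omega, ht, hbt, ?_⟩
              by_cases hji : j = i
              · subst hji; exact Or.inl hn
              · exact Or.inr ⟨j, by omega, hjt, hinv, hn⟩
          · rw [outA_skip ls i h hs, ih'.1 x]
            constructor
            · rintro ⟨t, hx, ht, hbt, j, hij, hjt, hinv, hn⟩
              exact ⟨t, hx, ht, hbt, j, by omega, hjt, hinv, hn⟩
            · rintro ⟨t, hx, ht, hbt, j, hij, hjt, hinv, hn⟩
              refine ⟨t, hx, ht, hbt, j, ?_, hjt, hinv, hn⟩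
              rcases Nat.lt_or_ge i j with h' | h'
              · omega
              · have : j = i := by omega
                subst this
                rw [invAt_lt ls j h] at hinv
                exact absurd hinv hs
        · by_cases hb : pvStarts ls[i] "{" = true
          · rw [inA_brace ls i h hb, ih'.1 x]
            have hbi : brcAt ls i = true := by rw [brcAt_lt ls i h]; exact hb
            constructor
            · rintro ⟨t, hx, ht, hbt, j, hij, hjt, hinv, hn⟩
              exact ⟨t, hx, by omega, ht, hbt,
                Or.inr ⟨j, by omega, hjt, hinv, hn⟩⟩
            · rintro ⟨t, hx, hit, ht, hbt, hd⟩
              have hti : t ≠ i := by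
                intro he; subst he; rw [hbi] at hbt; exact absurd hbt (by decide)
              refine ⟨t, hx, ht, hbt, ?_⟩
              rcases hd with hn | ⟨j, hij, hjt, hinv, hn⟩
              · exact absurd (hn i (le_refl i) (by omega)) (by simp [hbi])
              · have hji : j ≠ i := by
                  intro he; subst he
                  rw [invAt_lt ls j h] at hinv
                  rw [brace_not_inv _ hb] at hinv
                  exact absurd hinv (by decide)
                exact ⟨j, by omega, hjt, hinv, hn⟩
          · rw [inA_take ls i h hb]
            have hbi : brcAt ls i = false := by
              rw [brcAt_lt ls i h]; exact Bool.eq_false_iff.mpr hb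
            constructor
            · intro hx
              rcases List.mem_cons.mp hx with he | hm
              · exact ⟨i, he, le_refl i, h, hbi, Or.inl (fun k h1 h2 => absurd h1 (by omega))⟩
              · obtain ⟨t, hx', hit, ht, hbt, hd⟩ := (ih'.2 x).mp hm
                refine ⟨t, hx', by omega, ht, hbt, ?_⟩
                rcases hd with hn | ⟨j, hij, hjt, hinv, hn⟩
                · exact Or.inl (fun k h1 h2 => by
                    rcases Nat.lt_or_ge k (i + 1) with h' | h'
                    · have : k = i := by omega
                      subst this; exact hbi
                    · exact hn k h' h2)
                · exact Or.inr ⟨j, by omega, hjt, hinv, hn⟩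
            · rintro ⟨t, hx, hit, ht, hbt, hd⟩
              by_cases hti : t = i
              · subst hti; exact List.mem_cons.mpr (Or.inl hx)
              · refine List.mem_cons.mpr (Or.inr ((ih'.2 x).mpr ?_))
                refine ⟨t, hx, by omega, ht, hbt, ?_⟩
                rcases hd with hn | ⟨j, hij, hjt, hinv, hn⟩
                · exact Or.inl (fun k h1 h2 => hn k (by omega) h2)
                · by_cases hji : j = i
                  · subst hji; exact Or.inl hn
                  · exact Or.inr ⟨j, by omega, hjt, hinv, hn⟩
      · have hni := h
        constructor <;> intro x <;>
          simp only [outA_nil ls i hni, inA_nil ls i hni, List.not_mem_nil, false_iff] <;>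
          rintro ⟨t, -, hspec⟩
        · obtain ⟨ht, -, j, hij, hjt, -⟩ := hspec; omega
        · obtain ⟨hit, ht, -⟩ := hspec; omega

-- the machine's output is strictly increasing and bounded below by the cursor
lemma sortMachine (ls : List (List Char)) :
    ∀ (k i : Nat), ls.length - i ≤ k →
      ((pvOutA ls i).Pairwise (· < ·) ∧ ∀ x ∈ pvOutA ls i, (i : Int) ≤ x) ∧
      ((pvInA ls i).Pairwise (· < ·) ∧ ∀ x ∈ pvInA ls i, (i : Int) ≤ x) := by
  intro k
  induction k with
  | zero =>
      intro i hi
      have hni : ¬ i < ls.length := by omega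
      simp [outA_nil ls i hni, inA_nil ls i hni]
  | succ k ih =>
      intro i hi
      by_cases h : i < ls.length
      · have ih' := ih (i + 1) (by omega)
        have hstep : ∀ x : Int, ((i : Nat) + 1 : Int) ≤ x → (i : Int) ≤ x := by
          intro x hx; push_cast at hx ⊢; omega
        constructor
        · by_cases hs : pvStarts ls[i] "invariant" = true
          · rw [outA_inv ls i h hs]
            exact ⟨ih'.2.1, fun x hx => by
              have := ih'.2.2 x hx; push_cast at this ⊢; omega⟩
          · rw [outA_skip ls i h hs]
            exact ⟨ih'.1.1, fun x hx => by
              have := ih'.1.2 x hx; push_cast at this ⊢; omega⟩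
        · by_cases hb : pvStarts ls[i] "{" = true
          · rw [inA_brace ls i h hb]
            exact ⟨ih'.1.1, fun x hx => by
              have := ih'.1.2 x hx; push_cast at this ⊢; omega⟩
          · rw [inA_take ls i h hb]
            constructor
            · exact List.Pairwise.cons
                (fun x hx => by
                  have := ih'.2.2 x hx; push_cast at this ⊢; omega)
                ih'.2.1
            · intro x hx
              rcases List.mem_cons.mp hx with he | hm
              · omega
              · have := ih'.2.2 x hm; push_cast at this ⊢; omega
      · have hni := h
        simp [outA_nil ls i hni, inA_nil ls i hni]

-- the stripped list, pointwise
lemma stripped_getD (ls : List (List Char)) (k : Nat) :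
    (ls.map PySem.Chars.strip).getD k [] = PySem.Chars.strip (ls.getD k []) := by
  rcases Nat.lt_or_ge k ls.length with h | h
  · simp [h]
  · rw [List.getD_eq_default _ _ (by simpa using h), List.getD_eq_default _ _ h]
    rfl

lemma stripped_brc (ls : List (List Char)) (k : Nat) :
    PySem.Chars.startswith ((ls.map PySem.Chars.strip).getD k []) "{".toList = brcAt ls k := by
  rw [stripped_getD]; rfl

lemma stripped_inv (ls : List (List Char)) (k : Nat) :
    PySem.Chars.startswith ((ls.map PySem.Chars.strip).getD k []) "invariant".toList
      = invAt ls k := by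
  rw [stripped_getD]; rfl

-- membership in the braces index list
lemma mem_pvBraces (ls : List (List Char)) (x : Int) :
    x ∈ pvBraces (ls.map PySem.Chars.strip) ↔
      ∃ k : Nat, k < ls.length ∧ x = (k : Int) ∧ brcAt ls k = true := by
  unfold pvBraces
  rw [List.mem_filterMap]
  constructor
  · rintro ⟨p, hp, hf⟩
    obtain ⟨k, hk, hpe⟩ := (PySem.List.mem_enumerate_iff _ _ _).mp hp
    subst hpe
    simp only [zero_add] at hf
    split at hf
    · rename_i hb
      refine ⟨k, by simpa using hk, by exact (Option.some_inj.mp hf).symm, ?_⟩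
      rw [← stripped_brc ls k, List.getD_eq_getElem _ [] hk]
      exact hb
    · simp at hf
  · rintro ⟨k, hk, hx, hb⟩
    have hk' : k < (ls.map PySem.Chars.strip).length := by simpa using hk
    refine ⟨((k : Int), (ls.map PySem.Chars.strip)[k]),
      (PySem.List.mem_enumerate_iff _ _ _).mpr ⟨k, hk', by simp⟩, ?_⟩
    have : PySem.Chars.startswith (ls.map PySem.Chars.strip)[k] "{".toList = true := by
      rw [← List.getD_eq_getElem _ [] hk', stripped_brc]; exact hb
    rw [if_pos this, hx]

lemma pairwise_pvBraces (L : List (List Char)) : (pvBraces L).Pairwise (· < ·) := by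
  unfold pvBraces
  refine (PySem.List.pairwise_lt_enumerate L 0).filterMap _ ?_
  intro a a' hR b hb b' hb'
  split at hb
  · split at hb'
    · rw [← Option.some_inj.mp hb, ← Option.some_inj.mp hb']; exact hR
    · simp at hb'
  · simp at hb

-- find? on a strictly increasing list returns a minimal hit
lemma find?_first {p : Int → Bool} :
    ∀ (l : List Int), l.Pairwise (· < ·) → ∀ b, l.find? p = some b →
      ∀ y ∈ l, p y = true → b ≤ y := by
  intro l
  induction l with
  | nil => intro _ b hb; simp at hb
  | cons a t ih =>
      intro hp b hb y hy hpy
      by_cases ha : p a = true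
      · rw [List.find?_cons_of_pos ha] at hb
        have hba : b = a := (Option.some_inj.mp hb).symm
        subst hba
        rcases List.mem_cons.mp hy with he | hm
        · omega
        · exact le_of_lt ((List.pairwise_cons.mp hp).1 y hm)
      · rw [List.find?_cons_of_neg ha] at hb
        rcases List.mem_cons.mp hy with he | hm
        · subst he; exact absurd hpy ha
        · exact ih (List.pairwise_cons.mp hp).2 b hb y hm hpy

-- characterisation of the interval end: t lies below it iff t is in range and
-- no brace-starting line k has j < k ≤ t
lemma lt_pvEnd_iff (ls : List (List Char)) (j t : Nat) :
    (t : Int) < pvEnd (pvBraces (ls.map PySem.Chars.strip))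
        (PySem.List.len (ls.map PySem.Chars.strip)) (j : Int) ↔
      (t < ls.length ∧ ∀ k, j < k → k ≤ t → brcAt ls k = false) := by
  have hn : PySem.List.len (ls.map PySem.Chars.strip) = (ls.length : Int) := by
    rw [PySem.List.len_eq]; simp
  unfold pvEnd
  cases hf : (pvBraces (ls.map PySem.Chars.strip)).find? (fun b => decide ((j : Int) < b)) with
  | none =>
      have hall := List.find?_eq_none.mp hf
      rw [Option.getD_none, hn]
      constructor
      · intro ht
        have ht' : t < ls.length := by exact_mod_cast ht
        refine ⟨ht', fun k hjk hkt => ?_⟩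
        by_contra hbk
        simp only [Bool.not_eq_false] at hbk
        have hmem : (k : Int) ∈ pvBraces (ls.map PySem.Chars.strip) :=
          (mem_pvBraces ls _).mpr ⟨k, by omega, rfl, hbk⟩
        have := hall _ hmem
        simp only [decide_eq_true_eq] at this
        exact this (by exact_mod_cast hjk)
      · rintro ⟨ht, -⟩; exact_mod_cast ht
  | some b =>
      rw [Option.getD_some]
      have hbmem : b ∈ pvBraces (ls.map PySem.Chars.strip) := List.mem_of_find?_eq_some hf
      have hjb : (j : Int) < b := by
        have := List.find?_some hf; simpa using this
      obtain ⟨kb, hkb, hbe, hbrc⟩ := (mem_pvBraces ls _).mp hbmem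
      have hmin := find?_first _ (pairwise_pvBraces _) b hf
      subst hbe
      constructor
      · intro htb
        have htkb : t < kb := by exact_mod_cast htb
        refine ⟨by omega, fun k hjk hkt => ?_⟩
        by_contra hbk
        simp only [Bool.not_eq_false] at hbk
        have hkmem : (k : Int) ∈ pvBraces (ls.map PySem.Chars.strip) :=
          (mem_pvBraces ls _).mpr ⟨k, by omega, rfl, hbk⟩
        have hle : (kb : Int) ≤ (k : Int) :=
          hmin (k : Int) hkmem (by simp; exact_mod_cast hjk)
        have : kb ≤ k := by exact_mod_cast hle
        omega
      · rintro ⟨ht, hno⟩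
        have : t < kb := by
          by_contra hc
          have hkbt : kb ≤ t := by omega
          have hjkb : j < kb := by exact_mod_cast hjb
          have := hno kb hjkb hkbt
          rw [hbrc] at this
          exact absurd this (by decide)
        exact_mod_cast this

-- membership in the fold building the covered set
lemma mem_cover_aux (c : List Char → Bool) (f : Int → List Int) :
    ∀ (ps : List (Int × List Char)) (s : PySem.Set Int) (x : Int),
      x ∈ ps.foldl
          (fun s p => if c p.2 then PySem.Set.update s (f p.1) else s) s ↔
        x ∈ s ∨ ∃ p ∈ ps, c p.2 = true ∧ x ∈ f p.1 := by
  intro ps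
  induction ps with
  | nil => intro s x; simp
  | cons a t ih =>
      intro s x
      rw [List.foldl_cons, ih]
      by_cases hc : c a.2 = true
      · rw [if_pos hc, PySem.Set.mem_update]
        constructor
        · rintro (⟨hs | hf'⟩ | ⟨p, hp, hcp, hxp⟩)
          · exact Or.inl hs
          · exact Or.inr ⟨a, List.mem_cons_self .., hc, hf'⟩
          · exact Or.inr ⟨p, List.mem_cons_of_mem _ hp, hcp, hxp⟩
        · rintro (hs | ⟨p, hp, hcp, hxp⟩)
          · exact Or.inl (Or.inl hs)
          · rcases List.mem_cons.mp hp with he | hm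
            · subst he; exact Or.inl (Or.inr hxp)
            · exact Or.inr ⟨p, hm, hcp, hxp⟩
      · rw [if_neg hc]
        constructor
        · rintro (hs | ⟨p, hp, hcp, hxp⟩)
          · exact Or.inl hs
          · exact Or.inr ⟨p, List.mem_cons_of_mem _ hp, hcp, hxp⟩
        · rintro (hs | ⟨p, hp, hcp, hxp⟩)
          · exact Or.inl hs
          · rcases List.mem_cons.mp hp with he | hm
            · subst he; exact absurd hcp hc
            · exact Or.inr ⟨p, hm, hcp, hxp⟩

lemma nodup_cover_aux (c : List Char → Bool) (f : Int → List Int) :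
    ∀ (ps : List (Int × List Char)) (s : PySem.Set Int), s.Nodup →
      (ps.foldl (fun s p => if c p.2 then PySem.Set.update s (f p.1) else s) s).Nodup := by
  intro ps
  induction ps with
  | nil => intro s hs; exact hs
  | cons a t ih =>
      intro s hs
      rw [List.foldl_cons]
      by_cases hc : c a.2 = true
      · rw [if_pos hc]; exact ih _ (PySem.Set.nodup_update _ _ hs)
      · rw [if_neg hc]; exact ih _ hs

-- membership in B's covered set, in terms of the predicates on the unstripped lines
lemma mem_pvCover (ls : List (List Char)) (x : Int) :
    x ∈ pvCover (ls.map PySem.Chars.strip) ↔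
      ∃ k : Nat, k < ls.length ∧ invAt ls k = true ∧
        (k : Int) + 1 ≤ x ∧
        x < pvEnd (pvBraces (ls.map PySem.Chars.strip))
              (PySem.List.len (ls.map PySem.Chars.strip)) (k : Int) := by
  unfold pvCover
  rw [mem_cover_aux (fun l => PySem.Chars.startswith l "invariant".toList)
    (fun i => PySem.List.pyRange (i + 1)
      (pvEnd (pvBraces (ls.map PySem.Chars.strip))
        (PySem.List.len (ls.map PySem.Chars.strip)) i) 1)]
  constructor
  · rintro (hs | ⟨p, hp, hcp, hxp⟩)
    · exact absurd hs (List.not_mem_nil)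
    · obtain ⟨k, hk, hpe⟩ := (PySem.List.mem_enumerate_iff _ _ _).mp hp
      subst hpe
      simp only [zero_add] at hcp hxp
      obtain ⟨h1, h2⟩ := PySem.List.mem_pyRange_one.mp hxp
      refine ⟨k, by simpa using hk, ?_, h1, h2⟩
      rw [← stripped_inv ls k, List.getD_eq_getElem _ [] hk]
      exact hcp
  · rintro ⟨k, hk, hinv, h1, h2⟩
    have hk' : k < (ls.map PySem.Chars.strip).length := by simpa using hk
    refine Or.inr ⟨((k : Int), (ls.map PySem.Chars.strip)[k]),
      (PySem.List.mem_enumerate_iff _ _ _).mpr ⟨k, hk', by simp⟩, ?_, ?_⟩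
    · rw [← List.getD_eq_getElem _ [] hk', stripped_inv]; exact hinv
    · exact PySem.List.mem_pyRange_one.mpr ⟨h1, h2⟩

lemma nodup_pvCover (L : List (List Char)) : (pvCover L).Nodup := by
  unfold pvCover
  exact nodup_cover_aux (fun l => PySem.Chars.startswith l "invariant".toList)
    (fun i => PySem.List.pyRange (i + 1)
      (pvEnd (pvBraces L) (PySem.List.len L) i) 1)
    (PySem.List.enumerate L 0) PySem.Set.empty List.nodup_nil

-- the two membership characterisations coincide
lemma cover_eq_machine_mem (ls : List (List Char)) (x : Int) :
    x ∈ pvCover (ls.map PySem.Chars.strip) ↔ x ∈ pvOutA ls 0 := by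
  rw [mem_pvCover, (memMachine ls ls.length 0 (by omega)).1 x]
  constructor
  · rintro ⟨k, hk, hinv, h1, h2⟩
    have hx0 : 0 ≤ x := by omega
    set t : Nat := x.toNat with hts
    have hx : x = (t : Int) := (Int.toNat_of_nonneg hx0).symm
    rw [hx] at h2
    obtain ⟨ht, hno⟩ := (lt_pvEnd_iff ls k t).mp h2
    have hkt : k < t := by omega
    refine ⟨t, hx, ht, hno t (by omega) (le_refl t), k, Nat.zero_le k, hkt, hinv, ?_⟩
    intro k' h1' h2'
    exact hno k' (by omega) (by omega)
  · rintro ⟨t, hx, ht, hbt, j, -, hjt, hinv, hn⟩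
    refine ⟨j, by omega, hinv, by omega, ?_⟩
    rw [hx]
    refine (lt_pvEnd_iff ls j t).mpr ⟨ht, fun k' h1' h2' => ?_⟩
    rcases Nat.lt_or_ge k' t with h' | h'
    · exact hn k' (by omega) h'
    · have : k' = t := by omega
      subst this; exact hbt

-- ===== VERDICT (by name: the statement is the Claim_ definition above) =====
theorem get_invariant_lines_spec : Claim_equal_get_invariant_lines := by
  intro code _
  unfold Spec_get_invariant_lines get_invariant_lines get_invariant_lines_alt pvLinesB
  have hA : (List.foldl pvStepA (false, [])
      (PySem.List.enumerate (PySem.Chars.splitOn code.toList "\n".toList) 0)).2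
      = pvOutA (PySem.Chars.splitOn code.toList "\n".toList) 0 := by
    have h := (pvLoops (PySem.Chars.splitOn code.toList "\n".toList)
      (PySem.Chars.splitOn code.toList "\n".toList).length 0 (by omega)).1 []
    simpa using h
  rw [hA]
  have hpair := (sortMachine (PySem.Chars.splitOn code.toList "\n".toList)
    (PySem.Chars.splitOn code.toList "\n".toList).length 0 (by omega)).1.1
  have hnodup : (pvOutA (PySem.Chars.splitOn code.toList "\n".toList) 0).Nodup :=
    hpair.imp (fun h => ne_of_lt h)
  have hperm : (pvOutA (PySem.Chars.splitOn code.toList "\n".toList) 0).Perm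
      (pvCover ((PySem.Chars.splitOn code.toList "\n".toList).map PySem.Chars.strip)) :=
    (List.perm_ext_iff_of_nodup hnodup (nodup_pvCover _)).mpr
      (fun a => (cover_eq_machine_mem _ a).symm)
  exact (PySem.List.sorted_eq_of_perm_of_pairwise_lt _ _ _ hperm hpair).symm
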